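-- pv_equiv track=rewrite | github.com/IsaacG/Advent-of-Code | advent_of_code/2024/d19.py | part1_fast
-- ===== SOURCE A (Python) =====
-- import functools
--
-- def part1_fast(puzzle_input: tuple[list[str], list[str]]) -> int:
--     """Return how many patterns can be formed with the given towels."""
--     towels, patterns = puzzle_input
--     towels.sort(key=len)
--
--     @functools.cache
--     def possible(pattern: str) -> bool:
--         return any(
--             pattern == towel or (
--                 pattern.startswith(towel) and possible(pattern.removeprefix(towel))
--             )
--             for towel in towels
--         )
--
--     return sum(1 for pattern in patterns if possible(pattern))
-- ===== SOURCE B (Python) =====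
-- def part1_fast(puzzle_input):
--     """Return how many patterns can be formed with the given towels."""
--     towels, patterns = puzzle_input
--     towel_set = set(towels)
--     lens = sorted({len(t) for t in towels})
--     count = 0
--     for pattern in patterns:
--         n = len(pattern)
--         can = [False] * (n + 1)  # can[i]: pattern[i:] is a concatenation of >= 1 towels
--         for i in range(n - 1, -1, -1):
--             can[i] = any(
--                 i + k <= n
--                 and pattern[i:i + k] in towel_set
--                 and (i + k == n or can[i + k])
--                 for k in lens
--             )
--         count += can[0]
--     return count
-- ===== Notes on version B (the rewrite author's own statement) =====
-- stated objective: faster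
-- what changed: Replaces the memoized top-down recursion that scans every towel with startswith/removeprefix at each step by an iterative right-to-left suffix DP per pattern that probes only the distinct towel lengths against a hash set of towels.
-- outside the precondition, e.g. on part1_fast(([''], [''])): A returns 1, B returns 0
import Mathlib
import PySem

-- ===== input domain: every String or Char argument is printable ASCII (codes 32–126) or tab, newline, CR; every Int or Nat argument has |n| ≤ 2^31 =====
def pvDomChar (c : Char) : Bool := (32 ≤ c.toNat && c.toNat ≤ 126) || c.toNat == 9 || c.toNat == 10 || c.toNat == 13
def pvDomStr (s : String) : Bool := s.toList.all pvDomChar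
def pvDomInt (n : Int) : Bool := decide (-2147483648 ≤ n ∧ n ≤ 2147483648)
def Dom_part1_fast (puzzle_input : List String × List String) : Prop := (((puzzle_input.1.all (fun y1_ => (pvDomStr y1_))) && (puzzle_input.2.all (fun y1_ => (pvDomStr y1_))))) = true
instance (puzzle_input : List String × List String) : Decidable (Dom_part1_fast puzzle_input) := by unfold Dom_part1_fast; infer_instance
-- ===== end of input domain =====

-- B replaces A's memoized towel-scanning recursion by a per-pattern suffix DP over a towel
-- set keyed by the distinct towel lengths (objective: faster). A sorts its towel list in
-- place; the equivalence proved here is about the return value only.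

-- ===== PORT A =====
-- possible(pattern), with fuel making the recursion total: Python's recursion strictly
-- shortens the pattern whenever no towel is "", so fuel |pattern|+1 is never exhausted
-- inside Pre_; where Python raises RecursionError (empty towel) the inputs are outside Pre_.
-- pattern.removeprefix(towel) inside the startswith branch = drop of the prefix length (exact).
def pvPossibleA (towels : List String) : Nat → List Char → Bool
  | 0, _ => false
  | fuel + 1, pattern =>
    towels.any (fun towel =>
      pattern == towel.toList ||
        (PySem.Chars.startswith pattern towel.toList &&
          pvPossibleA towels fuel (pattern.drop towel.toList.length)))

def part1_fast (puzzle_input : List String × List String) : Int :=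
  let towels := PySem.List.sorted puzzle_input.1 (fun t => PySem.Str.len t) false
  -- sum(1 for pattern in patterns if possible(pattern)) = countP
  ((puzzle_input.2.countP (fun p => pvPossibleA towels (p.toList.length + 1) p.toList)) : Int)

-- ===== PORT B =====
-- can[i] for one position: suffix = pattern[i:], acc = [can[i+1], …, can[n]], so can[i+k] = acc[k-1]
-- for k ≥ 1; for k = 0 Python reads can[i] itself, whose cell is still its initial False — rendered
-- exactly by the 0 < k factor.
def pvStepB (towelSet : PySem.Set (List Char)) (lens : List Nat) (suffix : List Char)
    (acc : List Bool) : Bool :=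
  lens.any (fun k =>
    decide (k ≤ suffix.length) && PySem.Set.contains towelSet (suffix.take k) &&
      (decide (k = suffix.length) || (decide (0 < k) && acc.getD (k - 1) false)))

-- the i-loop, right to left: pvCanB s = [can[i], …, can[n]] for the suffix s = pattern[i:]
def pvCanB (towelSet : PySem.Set (List Char)) (lens : List Nat) : List Char → List Bool
  | [] => [false]
  | c :: rest =>
    pvStepB towelSet lens (c :: rest) (pvCanB towelSet lens rest) :: pvCanB towelSet lens rest

def part1_fast_alt (puzzle_input : List String × List String) : Int :=
  let towelSet := PySem.Set.ofList (puzzle_input.1.map String.toList)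
  let lens := PySem.List.sorted (PySem.Set.ofList (puzzle_input.1.map (fun t => t.toList.length)))
    (fun k => k) false
  ((puzzle_input.2.countP (fun p =>
    (pvCanB towelSet lens p.toList).getD 0 false)) : Int)

-- ===== PRECONDITION & SPEC =====
-- Pre_ excludes an empty towel: on it A's recursion re-enters itself and raises RecursionError
-- for any nonempty pattern, and on all-empty patterns A's count of "" via the degenerate towel
-- is accidental; B ignores the useless empty towel.
def Pre_part1_fast (puzzle_input : List String × List String) : Prop :=
  "" ∉ puzzle_input.1
instance (puzzle_input : List String × List String) : Decidable (Pre_part1_fast puzzle_input) := by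
  unfold Pre_part1_fast; infer_instance

def pvWitness_part1_fast : (List String × List String) := (["a", "ab"], ["ab", "b", ""])

def Spec_part1_fast (puzzle_input : List String × List String) (out : Int) : Prop := out = part1_fast_alt puzzle_input
instance (puzzle_input : List String × List String) (out : Int) : Decidable (Spec_part1_fast puzzle_input out) := by unfold Spec_part1_fast; infer_instance

-- ===== CLAIM (what is proved, stated in full; the proofs are below) =====
def Claim_equal_part1_fast : Prop := ∀ (puzzle_input : List String × List String), Dom_part1_fast puzzle_input → Pre_part1_fast puzzle_input → Spec_part1_fast puzzle_input (part1_fast puzzle_input)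

-- ===== LEMMAS AND PROOFS =====

theorem pvCanB_getD (ts : PySem.Set (List Char)) (ls : List Nat) (s : List Char) (j : Nat) :
    (pvCanB ts ls s).getD j false =
      if j ≤ s.length then (pvCanB ts ls (s.drop j)).getD 0 false else false := by
  induction s generalizing j with
  | nil =>
    cases j with
    | zero => simp [pvCanB]
    | succ j => simp [pvCanB]
  | cons c rest ih =>
    cases j with
    | zero => simp
    | succ j =>
      have : (pvCanB ts ls (c :: rest)).getD (j + 1) false = (pvCanB ts ls rest).getD j false := by
        simp [pvCanB]
      rw [this, ih]
      simp

theorem pv_main (towels : List String) (hT : "" ∉ towels) :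
    ∀ fuel s, s.length < fuel →
      pvPossibleA (PySem.List.sorted towels (fun t => PySem.Str.len t) false) fuel s =
        (pvCanB (PySem.Set.ofList (towels.map String.toList))
          (PySem.List.sorted (PySem.Set.ofList (towels.map (fun t => t.toList.length)))
            (fun k => k) false) s).getD 0 false := by
  intro fuel
  induction fuel with
  | zero => intro s hs; exact absurd hs (Nat.not_lt_zero _)
  | succ n ih =>
    intro s hs
    have htne : ∀ t : String, t ∈ towels → t.toList ≠ [] := by
      intro t ht hn
      exact hT (String.toList_eq_nil_iff.mp hn ▸ ht)
    cases s with
    | nil =>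
      simp only [pvPossibleA, pvCanB, List.getD_cons_zero]
      apply List.any_eq_false.mpr
      intro t ht
      have ht' : t ∈ towels := (PySem.List.mem_sorted ..).mp ht
      have hne := htne t ht'
      simp only [Bool.or_eq_true, Bool.and_eq_true, beq_iff_eq, PySem.Chars.startswith_iff,
        List.prefix_nil, not_or, not_and]
      exact ⟨fun h => hne h.symm, fun h => absurd h hne⟩
    | cons c rest =>
      have hrest : rest.length < n := by
        simpa using Nat.lt_of_succ_lt_succ hs
      have hbridge : ∀ k, 1 ≤ k → k ≤ rest.length + 1 →
          (pvCanB (PySem.Set.ofList (towels.map String.toList))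
            (PySem.List.sorted (PySem.Set.ofList (towels.map (fun t => t.toList.length)))
              (fun k => k) false) rest).getD (k - 1) false =
          pvPossibleA (PySem.List.sorted towels (fun t => PySem.Str.len t) false) n
            ((c :: rest).drop k) := by
        intro k hk1 hk2
        rw [pvCanB_getD, if_pos (by omega : k - 1 ≤ rest.length)]
        have hdrop : (c :: rest).drop k = rest.drop (k - 1) := by
          cases k with
          | zero => omega
          | succ k => simp
        rw [hdrop]
        exact (ih _ (by simp only [List.length_drop]; omega)).symm
      apply Bool.coe_iff_coe.mp
      simp only [pvPossibleA, pvCanB, List.getD_cons_zero, pvStepB, List.any_eq_true,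
        Bool.or_eq_true, Bool.and_eq_true, beq_iff_eq, decide_eq_true_eq,
        PySem.Chars.startswith_iff, PySem.List.mem_sorted, PySem.Set.mem_ofList,
        PySem.Set.contains_eq_listContains, List.contains_eq_mem,
        List.mem_map, List.length_cons]
      constructor
      · rintro ⟨t, ht, hcase⟩
        have hne := htne t ht
        have hk1 : 1 ≤ t.toList.length := List.length_pos_iff.mpr hne
        rcases hcase with heq | ⟨hpre, hrec⟩
        · have hlen : t.toList.length = rest.length + 1 := by
            rw [← heq]; simp
          refine ⟨t.toList.length, ⟨t, ht, rfl⟩, ⟨⟨by omega, t, ht, ?_⟩, Or.inl hlen⟩⟩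
          rw [hlen, ← heq]
          exact (List.take_of_length_le (by simp)).symm
        · have hle : t.toList.length ≤ rest.length + 1 := by
            have := hpre.length_le; simpa using this
          refine ⟨t.toList.length, ⟨t, ht, rfl⟩,
            ⟨⟨hle, t, ht, List.prefix_iff_eq_take.mp hpre⟩, ?_⟩⟩
          by_cases hk : t.toList.length = rest.length + 1
          · exact Or.inl hk
          · exact Or.inr ⟨hk1, by rw [hbridge _ hk1 hle]; exact hrec⟩
      · rintro ⟨k, ⟨t0, ht0, hk0⟩, ⟨hkle, t, ht, htake⟩, hlast⟩
        have hk1 : 1 ≤ k := by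
          have := List.length_pos_iff.mpr (htne t0 ht0)
          omega
        have hlen : t.toList.length = k := by
          rw [htake]
          simp only [List.length_take, List.length_cons]
          omega
        refine ⟨t, ht, ?_⟩
        rcases hlast with hk | ⟨hkpos, hcan⟩
        · refine Or.inl ?_
          rw [htake, hk]
          exact (List.take_of_length_le (by simp)).symm
        · refine Or.inr ⟨?_, ?_⟩
          · rw [htake]; exact List.take_prefix _ _
          · rw [hlen, ← hbridge k hk1 hkle]; exact hcan

theorem part1_fast_spec : Claim_equal_part1_fast := by
  intro pi _hdom hpre
  unfold Spec_part1_fast part1_fast part1_fast_alt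
  simp only
  congr 1
  apply List.countP_congr
  intro p _
  rw [pv_main pi.1 hpre (p.toList.length + 1) p.toList (Nat.lt_succ_self _)]
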